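-- pv_equiv track=rewrite | github.com/RadiccPlayz/Garbage-Collector | platform_detect.py | _family
-- ===== SOURCE A (Python) =====
-- class Distro:
--     UNKNOWN  = "unknown"
--     DEBIAN   = "debian"      # Debian, Ubuntu, PopOS, Mint, Elementary, Zorin…
--     FEDORA   = "fedora"      # Fedora, Nobara, RHEL, CentOS, AlmaLinux, Rocky…
--     ARCH     = "arch"        # Arch, Manjaro, EndeavourOS, Garuda, CachyOS…
--     OPENSUSE = "opensuse"    # openSUSE Leap / Tumbleweed
--     GENTOO   = "gentoo"      # Gentoo, Funtoo
--     VOID     = "void"        # Void Linux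
--     ALPINE   = "alpine"      # Alpine Linux
--     NIXOS    = "nixos"       # NixOS
--     SOLUS    = "solus"       # Solus
--
-- _DEBIAN_IDS = {
--     "debian", "ubuntu", "pop", "linuxmint", "mint", "elementary",
--     "zorin", "kali", "parrot", "mx", "raspbian", "deepin", "backbox",
--     "tails", "crunchbang", "bunsenlabs", "antix", "sparky", "pureos",
--     "lmde", "kubuntu", "xubuntu", "lubuntu", "ubuntu-mate",
-- }
--
-- _FEDORA_IDS = {
--     "fedora", "nobara", "rhel", "centos", "almalinux", "rocky",
--     "oracle", "scientific", "clearos", "springdale", "eurolinux",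
--     "amazon", "photon",
-- }
--
-- _ARCH_IDS = {
--     "arch", "manjaro", "endeavouros", "garuda", "cachyos",
--     "artix", "arco", "rebornos", "crystal", "archcraft",
-- }
--
-- _OPENSUSE_IDS = {"opensuse", "opensuse-leap", "opensuse-tumbleweed", "sled", "sles"}
--
-- _GENTOO_IDS   = {"gentoo", "funtoo", "calculate"}
--
-- _VOID_IDS     = {"void"}
--
-- _ALPINE_IDS   = {"alpine"}
--
-- _NIXOS_IDS    = {"nixos"}
--
-- _SOLUS_IDS    = {"solus"}
--
-- def _family(distro_id: str, like: str) -> str: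
--     did = distro_id.lower()
--     lk  = like.lower()
--     for ids, fam in (
--         (_DEBIAN_IDS,   Distro.DEBIAN),
--         (_FEDORA_IDS,   Distro.FEDORA),
--         (_ARCH_IDS,     Distro.ARCH),
--         (_OPENSUSE_IDS, Distro.OPENSUSE),
--         (_GENTOO_IDS,   Distro.GENTOO),
--         (_VOID_IDS,     Distro.VOID),
--         (_ALPINE_IDS,   Distro.ALPINE),
--         (_NIXOS_IDS,    Distro.NIXOS),
--         (_SOLUS_IDS,    Distro.SOLUS),
--     ):
--         if did in ids or any(l in ids for l in lk.split()):
--             return fam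
--     return Distro.UNKNOWN
-- ===== SOURCE B (Python) =====
-- # B: single pass over the input tokens with a precomputed reverse map id -> family
-- # priority index; the minimum matched index preserves A's earliest-family-wins order.
--
-- _FAMILY_NAMES = ("debian", "fedora", "arch", "opensuse", "gentoo", "void",
--                  "alpine", "nixos", "solus")
--
-- _ID_LISTS = (
--     ("debian", "ubuntu", "pop", "linuxmint", "mint", "elementary",
--      "zorin", "kali", "parrot", "mx", "raspbian", "deepin", "backbox",
--      "tails", "crunchbang", "bunsenlabs", "antix", "sparky", "pureos",
--      "lmde", "kubuntu", "xubuntu", "lubuntu", "ubuntu-mate"),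
--     ("fedora", "nobara", "rhel", "centos", "almalinux", "rocky",
--      "oracle", "scientific", "clearos", "springdale", "eurolinux",
--      "amazon", "photon"),
--     ("arch", "manjaro", "endeavouros", "garuda", "cachyos",
--      "artix", "arco", "rebornos", "crystal", "archcraft"),
--     ("opensuse", "opensuse-leap", "opensuse-tumbleweed", "sled", "sles"),
--     ("gentoo", "funtoo", "calculate"),
--     ("void",),
--     ("alpine",),
--     ("nixos",),
--     ("solus",),
-- )
--
-- _PRIORITY = {}
-- for _idx, _ids in enumerate(_ID_LISTS):
--     for _name in _ids:
--         _PRIORITY.setdefault(_name, _idx)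
--
-- def _family(distro_id: str, like: str) -> str:
--     best = None
--     for tok in [distro_id.lower()] + like.lower().split():
--         j = _PRIORITY.get(tok)
--         if j is not None and (best is None or j < best):
--             best = j
--     return _FAMILY_NAMES[best] if best is not None else "unknown"
-- ===== Notes on version B (the rewrite author's own statement) =====
-- stated objective: alternative
-- what changed: Replaces A's scan over nine id-sets (each testing the distro id and rescanning the like-words) with a module-level reverse dict mapping each id to its family's priority index, so _family makes one pass over the tokens keeping the minimum matched index.
import Mathlib
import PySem

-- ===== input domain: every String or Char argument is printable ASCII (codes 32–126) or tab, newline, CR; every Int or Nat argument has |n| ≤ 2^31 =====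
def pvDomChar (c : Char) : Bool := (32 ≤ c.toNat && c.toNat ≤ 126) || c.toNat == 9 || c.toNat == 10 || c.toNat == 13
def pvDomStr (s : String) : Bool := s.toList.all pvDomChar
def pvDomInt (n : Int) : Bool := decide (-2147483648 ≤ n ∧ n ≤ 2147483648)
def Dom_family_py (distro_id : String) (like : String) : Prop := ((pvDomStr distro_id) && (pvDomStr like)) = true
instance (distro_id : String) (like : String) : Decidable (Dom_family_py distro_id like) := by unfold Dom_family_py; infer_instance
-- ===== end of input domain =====

-- B replaces A's scan over nine id-sets by one pass over the input tokens against a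
-- precomputed reverse map id -> family priority index, keeping the minimum matched index
-- (objective: alternative/idiomatic single-pass table lookup; same observable behaviour).

-- ===== PORT A =====
def pvDebianIds : PySem.Set String := PySem.Set.ofList
  ["debian", "ubuntu", "pop", "linuxmint", "mint", "elementary",
   "zorin", "kali", "parrot", "mx", "raspbian", "deepin", "backbox",
   "tails", "crunchbang", "bunsenlabs", "antix", "sparky", "pureos",
   "lmde", "kubuntu", "xubuntu", "lubuntu", "ubuntu-mate"]
def pvFedoraIds : PySem.Set String := PySem.Set.ofList
  ["fedora", "nobara", "rhel", "centos", "almalinux", "rocky",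
   "oracle", "scientific", "clearos", "springdale", "eurolinux",
   "amazon", "photon"]
def pvArchIds : PySem.Set String := PySem.Set.ofList
  ["arch", "manjaro", "endeavouros", "garuda", "cachyos",
   "artix", "arco", "rebornos", "crystal", "archcraft"]
def pvOpensuseIds : PySem.Set String := PySem.Set.ofList
  ["opensuse", "opensuse-leap", "opensuse-tumbleweed", "sled", "sles"]
def pvGentooIds : PySem.Set String := PySem.Set.ofList ["gentoo", "funtoo", "calculate"]
def pvVoidIds : PySem.Set String := PySem.Set.ofList ["void"]
def pvAlpineIds : PySem.Set String := PySem.Set.ofList ["alpine"]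
def pvNixosIds : PySem.Set String := PySem.Set.ofList ["nixos"]
def pvSolusIds : PySem.Set String := PySem.Set.ofList ["solus"]

def pvFamilyTable : List (PySem.Set String × String) :=
  [(pvDebianIds, "debian"), (pvFedoraIds, "fedora"), (pvArchIds, "arch"),
   (pvOpensuseIds, "opensuse"), (pvGentooIds, "gentoo"), (pvVoidIds, "void"),
   (pvAlpineIds, "alpine"), (pvNixosIds, "nixos"), (pvSolusIds, "solus")]

-- the for-loop with early return, as structural recursion over the table
def pvFamLoop (did : String) (toks : List String) : List (PySem.Set String × String) → String
  | [] => "unknown"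
  | (ids, fam) :: rest =>
    if PySem.Set.contains ids did || toks.any (fun l => PySem.Set.contains ids l) then fam
    else pvFamLoop did toks rest

def family_py (distro_id : String) (like : String) : String :=
  let did := PySem.Str.lower distro_id
  let lk := PySem.Str.lower like
  pvFamLoop did (PySem.Str.split₀ lk) pvFamilyTable

-- ===== PORT B =====
def pvFamilyNames : List String :=
  ["debian", "fedora", "arch", "opensuse", "gentoo", "void", "alpine", "nixos", "solus"]

def pvIdLists : List (List String) :=
  [["debian", "ubuntu", "pop", "linuxmint", "mint", "elementary",
    "zorin", "kali", "parrot", "mx", "raspbian", "deepin", "backbox",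
    "tails", "crunchbang", "bunsenlabs", "antix", "sparky", "pureos",
    "lmde", "kubuntu", "xubuntu", "lubuntu", "ubuntu-mate"],
   ["fedora", "nobara", "rhel", "centos", "almalinux", "rocky",
    "oracle", "scientific", "clearos", "springdale", "eurolinux",
    "amazon", "photon"],
   ["arch", "manjaro", "endeavouros", "garuda", "cachyos",
    "artix", "arco", "rebornos", "crystal", "archcraft"],
   ["opensuse", "opensuse-leap", "opensuse-tumbleweed", "sled", "sles"],
   ["gentoo", "funtoo", "calculate"],
   ["void"], ["alpine"], ["nixos"], ["solus"]]

-- module-level reverse map: id -> family priority index (first occurrence wins)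
def pvPriority : PySem.Dict String Int :=
  (PySem.List.enumerate pvIdLists).foldl
    (fun d p => p.2.foldl (fun d name => d.setdefault name p.1) d)
    PySem.Dict.empty

def pvBestStep (best : Option Int) (tok : String) : Option Int :=
  match pvPriority.get? tok with
  | none => best
  | some j => match best with
    | none => some j
    | some b => if j < b then some j else best

def family_py_alt (distro_id : String) (like : String) : String :=
  let toks := PySem.Str.lower distro_id :: PySem.Str.split₀ (PySem.Str.lower like)
  match toks.foldl pvBestStep none with
  | none => "unknown"
  | some b => PySem.List.pyGetD pvFamilyNames b "unknown"

-- ===== PRECONDITION & SPEC =====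
def Spec_family_py (distro_id : String) (like : String) (out : String) : Prop := out = family_py_alt distro_id like
instance (distro_id : String) (like : String) (out : String) : Decidable (Spec_family_py distro_id like out) := by unfold Spec_family_py; infer_instance

-- ===== CLAIM (what is proved, stated in full; the proofs are below) =====
def Claim_equal_family_py : Prop := ∀ (distro_id : String) (like : String), Dom_family_py distro_id like → Spec_family_py distro_id like (family_py distro_id like)

-- ===== LEMMAS AND PROOFS =====

-- proof-side view of the reverse map: blocks in family order, first block containing t wins
def pvBlocks : List (PySem.Set String × Int) :=
  [(pvDebianIds, 0), (pvFedoraIds, 1), (pvArchIds, 2), (pvOpensuseIds, 3), (pvGentooIds, 4), (pvVoidIds, 5), (pvAlpineIds, 6), (pvNixosIds, 7), (pvSolusIds, 8)]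

def pvLookup (t : String) : Option Int :=
  if t ∈ pvDebianIds then some 0
  else if t ∈ pvFedoraIds then some 1
  else if t ∈ pvArchIds then some 2
  else if t ∈ pvOpensuseIds then some 3
  else if t ∈ pvGentooIds then some 4
  else if t ∈ pvVoidIds then some 5
  else if t ∈ pvAlpineIds then some 6
  else if t ∈ pvNixosIds then some 7
  else if t ∈ pvSolusIds then some 8
  else none

lemma pvGetMk_block (l : List String) (i : Int) (t : String) :
    (PySem.Dict.mk (l.map (fun s => (s, i)))).get? t = if t ∈ l then some i else none := by
  induction l with
  | nil => simp [PySem.Dict.get?]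
  | cons a l ih =>
    simp only [List.map_cons, PySem.Dict.get?_mk_cons, ih, List.mem_cons, beq_iff_eq]
    by_cases h : a = t
    · subst h; simp
    · have h2 : ¬ t = a := fun hh => h hh.symm
      simp [h, h2]

lemma pvGetMk_append (xs ys : List (String × Int)) (t : String) :
    (PySem.Dict.mk (xs ++ ys)).get? t = ((PySem.Dict.mk xs).get? t).or ((PySem.Dict.mk ys).get? t) := by
  induction xs with
  | nil => simp [PySem.Dict.get?]
  | cons a xs ih =>
    obtain ⟨k, v⟩ := a
    simp only [List.cons_append, PySem.Dict.get?_mk_cons, ih]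
    by_cases h : (k == t) = true <;> simp [h]

lemma pvGetMk_flat (bs : List (List String × Int)) (t : String) :
    (PySem.Dict.mk (bs.flatMap (fun p => p.1.map (fun s => (s, p.2))))).get? t
      = bs.findSome? (fun p => if t ∈ p.1 then some p.2 else none) := by
  induction bs with
  | nil => simp [PySem.Dict.get?]
  | cons p bs ih =>
    simp only [List.flatMap_cons, List.findSome?_cons, pvGetMk_append, pvGetMk_block, ih]
    by_cases h : t ∈ p.1 <;> simp [h]

set_option maxRecDepth 8192 in
lemma pvPriority_eq_mk :
    pvPriority = PySem.Dict.mk (pvBlocks.flatMap (fun p => p.1.map (fun s => (s, p.2)))) := by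
  decide

lemma pvLookup_eq (t : String) : pvPriority.get? t = pvLookup t := by
  rw [pvPriority_eq_mk, pvGetMk_flat]
  simp only [pvBlocks, List.findSome?_cons, List.findSome?_nil]
  by_cases h0 : t ∈ pvDebianIds
  · simp [pvLookup, h0]
  · 
    by_cases h1 : t ∈ pvFedoraIds
    · simp [pvLookup, h1, h0]
    · 
      by_cases h2 : t ∈ pvArchIds
      · simp [pvLookup, h2, h0, h1]
      · 
        by_cases h3 : t ∈ pvOpensuseIds
        · simp [pvLookup, h3, h0, h1, h2]
        · 
          by_cases h4 : t ∈ pvGentooIds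
          · simp [pvLookup, h4, h0, h1, h2, h3]
          · 
            by_cases h5 : t ∈ pvVoidIds
            · simp [pvLookup, h5, h0, h1, h2, h3, h4]
            · 
              by_cases h6 : t ∈ pvAlpineIds
              · simp [pvLookup, h6, h0, h1, h2, h3, h4, h5]
              · 
                by_cases h7 : t ∈ pvNixosIds
                · simp [pvLookup, h7, h0, h1, h2, h3, h4, h5, h6]
                · 
                  by_cases h8 : t ∈ pvSolusIds
                  · simp [pvLookup, h8, h0, h1, h2, h3, h4, h5, h6, h7]
                  · simp [pvLookup, h0, h1, h2, h3, h4, h5, h6, h7, h8]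

lemma pvLookup_cases (t : String) (x : Int) (h : pvLookup t = some x) :
    (x = 0 ∧ t ∈ pvDebianIds) ∨ (x = 1 ∧ t ∈ pvFedoraIds) ∨ (x = 2 ∧ t ∈ pvArchIds) ∨
    (x = 3 ∧ t ∈ pvOpensuseIds) ∨ (x = 4 ∧ t ∈ pvGentooIds) ∨ (x = 5 ∧ t ∈ pvVoidIds) ∨
    (x = 6 ∧ t ∈ pvAlpineIds) ∨ (x = 7 ∧ t ∈ pvNixosIds) ∨ (x = 8 ∧ t ∈ pvSolusIds) := by
  unfold pvLookup at h
  by_cases h0 : t ∈ pvDebianIds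
  · rw [if_pos h0] at h; injection h with h; subst h
    exact Or.inl ⟨rfl, h0⟩
  · rw [if_neg h0] at h
    by_cases h1 : t ∈ pvFedoraIds
    · rw [if_pos h1] at h; injection h with h; subst h
      exact Or.inr (Or.inl ⟨rfl, h1⟩)
    · rw [if_neg h1] at h
      by_cases h2 : t ∈ pvArchIds
      · rw [if_pos h2] at h; injection h with h; subst h
        exact Or.inr (Or.inr (Or.inl ⟨rfl, h2⟩))
      · rw [if_neg h2] at h
        by_cases h3 : t ∈ pvOpensuseIds
        · rw [if_pos h3] at h; injection h with h; subst h
          exact Or.inr (Or.inr (Or.inr (Or.inl ⟨rfl, h3⟩)))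
        · rw [if_neg h3] at h
          by_cases h4 : t ∈ pvGentooIds
          · rw [if_pos h4] at h; injection h with h; subst h
            exact Or.inr (Or.inr (Or.inr (Or.inr (Or.inl ⟨rfl, h4⟩))))
          · rw [if_neg h4] at h
            by_cases h5 : t ∈ pvVoidIds
            · rw [if_pos h5] at h; injection h with h; subst h
              exact Or.inr (Or.inr (Or.inr (Or.inr (Or.inr (Or.inl ⟨rfl, h5⟩)))))
            · rw [if_neg h5] at h
              by_cases h6 : t ∈ pvAlpineIds
              · rw [if_pos h6] at h; injection h with h; subst h
                exact Or.inr (Or.inr (Or.inr (Or.inr (Or.inr (Or.inr (Or.inl ⟨rfl, h6⟩))))))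
              · rw [if_neg h6] at h
                by_cases h7 : t ∈ pvNixosIds
                · rw [if_pos h7] at h; injection h with h; subst h
                  exact Or.inr (Or.inr (Or.inr (Or.inr (Or.inr (Or.inr (Or.inr (Or.inl ⟨rfl, h7⟩)))))))
                · rw [if_neg h7] at h
                  by_cases h8 : t ∈ pvSolusIds
                  · rw [if_pos h8] at h; injection h with h; subst h
                    exact Or.inr (Or.inr (Or.inr (Or.inr (Or.inr (Or.inr (Or.inr (Or.inr (⟨rfl, h8⟩))))))))
                  · rw [if_neg h8] at h; simp at h

lemma pvFoldB_some (ts : List String) : ∀ (b : Int),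
    ts.foldl pvBestStep (some b) = some ((ts.filterMap pvLookup).foldl min b) := by
  induction ts with
  | nil => intro b; simp
  | cons t ts ih =>
    intro b
    rw [List.foldl_cons, List.filterMap_cons]
    cases h : pvLookup t with
    | none =>
      have hs : pvBestStep (some b) t = some b := by
        unfold pvBestStep; rw [pvLookup_eq, h]
      rw [hs, ih]
    | some j =>
      have hs : pvBestStep (some b) t = some (min b j) := by
        unfold pvBestStep; rw [pvLookup_eq, h]
        show (if j < b then some j else some b) = some (min b j)
        by_cases hj : j < b
        · rw [if_pos hj, min_def, if_neg (by omega)]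
        · rw [if_neg hj, min_def, if_pos (by omega)]
      rw [hs, ih, List.foldl_cons]

lemma pvFoldB_none (ts : List String) :
    ts.foldl pvBestStep none = (ts.filterMap pvLookup).min? := by
  cases ts with
  | nil => rfl
  | cons t ts =>
    rw [List.foldl_cons, List.filterMap_cons]
    cases h : pvLookup t with
    | none =>
      have hs : pvBestStep none t = none := by
        unfold pvBestStep; rw [pvLookup_eq, h]
      rw [hs, pvFoldB_none ts]
    | some j =>
      have hs : pvBestStep none t = some j := by
        unfold pvBestStep; rw [pvLookup_eq, h]
      rw [hs, pvFoldB_some, List.min?]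

lemma pvMin_eq (ts : List String) (j : Int) (t0 : String)
    (ht0 : t0 ∈ ts) (hl : pvLookup t0 = some j)
    (hlb : ∀ t ∈ ts, ∀ x, pvLookup t = some x → j ≤ x) :
    (ts.filterMap pvLookup).min? = some j := by
  rw [List.min?_eq_some_iff]
  exact ⟨List.mem_filterMap.2 ⟨t0, ht0, hl⟩,
    fun b hb => by obtain ⟨t, ht, he⟩ := List.mem_filterMap.1 hb; exact hlb t ht b he⟩

lemma famLoop_pos (did : String) (toks : List String) (ids : PySem.Set String)
    (fam : String) (rest : List (PySem.Set String × String))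
    (h : ∃ t ∈ did :: toks, t ∈ ids) :
    pvFamLoop did toks ((ids, fam) :: rest) = fam := by
  have hc : (PySem.Set.contains ids did || toks.any (fun l => PySem.Set.contains ids l)) = true := by
    rw [Bool.or_eq_true]
    rcases h with ⟨t, ht, hm⟩
    rcases List.mem_cons.1 ht with rfl | ht
    · exact Or.inl ((PySem.Set.contains_iff ids t).2 hm)
    · exact Or.inr (List.any_eq_true.2 ⟨t, ht, (PySem.Set.contains_iff ids t).2 hm⟩)
  show (if (PySem.Set.contains ids did || toks.any (fun l => PySem.Set.contains ids l)) = true then fam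
        else pvFamLoop did toks rest) = fam
  rw [if_pos hc]

lemma famLoop_neg (did : String) (toks : List String) (ids : PySem.Set String)
    (fam : String) (rest : List (PySem.Set String × String))
    (h : ¬ ∃ t ∈ did :: toks, t ∈ ids) :
    pvFamLoop did toks ((ids, fam) :: rest) = pvFamLoop did toks rest := by
  have hc : ¬ ((PySem.Set.contains ids did || toks.any (fun l => PySem.Set.contains ids l)) = true) := by
    intro hc
    rw [Bool.or_eq_true] at hc
    rcases hc with hd | ha
    · exact h ⟨did, by simp, (PySem.Set.contains_iff ids did).1 hd⟩
    · obtain ⟨t, ht, hm⟩ := List.any_eq_true.1 ha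
      exact h ⟨t, List.mem_cons_of_mem _ ht, (PySem.Set.contains_iff ids t).1 hm⟩
  show (if (PySem.Set.contains ids did || toks.any (fun l => PySem.Set.contains ids l)) = true then fam
        else pvFamLoop did toks rest) = pvFamLoop did toks rest
  rw [if_neg hc]

lemma pvMain (did : String) (toks : List String) :
    pvFamLoop did toks pvFamilyTable =
      (match (did :: toks).foldl pvBestStep none with
       | none => "unknown"
       | some b => PySem.List.pyGetD pvFamilyNames b "unknown") := by
  rw [pvFoldB_none]
  unfold pvFamilyTable
  by_cases h0 : ∃ t ∈ did :: toks, t ∈ pvDebianIds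
  · rw [famLoop_pos did toks _ _ _ h0]
    obtain ⟨t0, ht0, hm⟩ := h0
    have hl : pvLookup t0 = some 0 := by
      unfold pvLookup
      rw [if_pos hm]
    have hlb : ∀ t ∈ did :: toks, ∀ x, pvLookup t = some x → (0 : Int) ≤ x := by
      intro t ht x hx
      rcases pvLookup_cases t x hx with ⟨rfl, h'⟩|⟨rfl, h'⟩|⟨rfl, h'⟩|⟨rfl, h'⟩|⟨rfl, h'⟩|⟨rfl, h'⟩|⟨rfl, h'⟩|⟨rfl, h'⟩|⟨rfl, h'⟩
      · norm_num
      · norm_num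
      · norm_num
      · norm_num
      · norm_num
      · norm_num
      · norm_num
      · norm_num
      · norm_num
    rw [pvMin_eq (did :: toks) 0 t0 ht0 hl hlb]
    rfl
  · rw [famLoop_neg did toks _ _ _ h0]
    by_cases h1 : ∃ t ∈ did :: toks, t ∈ pvFedoraIds
    · rw [famLoop_pos did toks _ _ _ h1]
      obtain ⟨t0, ht0, hm⟩ := h1
      have hl : pvLookup t0 = some 1 := by
        unfold pvLookup
        rw [if_neg (fun hmem => h0 ⟨t0, ht0, hmem⟩), if_pos hm]
      have hlb : ∀ t ∈ did :: toks, ∀ x, pvLookup t = some x → (1 : Int) ≤ x := by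
        intro t ht x hx
        rcases pvLookup_cases t x hx with ⟨rfl, h'⟩|⟨rfl, h'⟩|⟨rfl, h'⟩|⟨rfl, h'⟩|⟨rfl, h'⟩|⟨rfl, h'⟩|⟨rfl, h'⟩|⟨rfl, h'⟩|⟨rfl, h'⟩
        · exact absurd ⟨t, ht, h'⟩ h0
        · norm_num
        · norm_num
        · norm_num
        · norm_num
        · norm_num
        · norm_num
        · norm_num
        · norm_num
      rw [pvMin_eq (did :: toks) 1 t0 ht0 hl hlb]
      rfl
    · rw [famLoop_neg did toks _ _ _ h1]
      by_cases h2 : ∃ t ∈ did :: toks, t ∈ pvArchIds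
      · rw [famLoop_pos did toks _ _ _ h2]
        obtain ⟨t0, ht0, hm⟩ := h2
        have hl : pvLookup t0 = some 2 := by
          unfold pvLookup
          rw [if_neg (fun hmem => h0 ⟨t0, ht0, hmem⟩), if_neg (fun hmem => h1 ⟨t0, ht0, hmem⟩), if_pos hm]
        have hlb : ∀ t ∈ did :: toks, ∀ x, pvLookup t = some x → (2 : Int) ≤ x := by
          intro t ht x hx
          rcases pvLookup_cases t x hx with ⟨rfl, h'⟩|⟨rfl, h'⟩|⟨rfl, h'⟩|⟨rfl, h'⟩|⟨rfl, h'⟩|⟨rfl, h'⟩|⟨rfl, h'⟩|⟨rfl, h'⟩|⟨rfl, h'⟩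
          · exact absurd ⟨t, ht, h'⟩ h0
          · exact absurd ⟨t, ht, h'⟩ h1
          · norm_num
          · norm_num
          · norm_num
          · norm_num
          · norm_num
          · norm_num
          · norm_num
        rw [pvMin_eq (did :: toks) 2 t0 ht0 hl hlb]
        rfl
      · rw [famLoop_neg did toks _ _ _ h2]
        by_cases h3 : ∃ t ∈ did :: toks, t ∈ pvOpensuseIds
        · rw [famLoop_pos did toks _ _ _ h3]
          obtain ⟨t0, ht0, hm⟩ := h3
          have hl : pvLookup t0 = some 3 := by
            unfold pvLookup
            rw [if_neg (fun hmem => h0 ⟨t0, ht0, hmem⟩), if_neg (fun hmem => h1 ⟨t0, ht0, hmem⟩), if_neg (fun hmem => h2 ⟨t0, ht0, hmem⟩), if_pos hm]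
          have hlb : ∀ t ∈ did :: toks, ∀ x, pvLookup t = some x → (3 : Int) ≤ x := by
            intro t ht x hx
            rcases pvLookup_cases t x hx with ⟨rfl, h'⟩|⟨rfl, h'⟩|⟨rfl, h'⟩|⟨rfl, h'⟩|⟨rfl, h'⟩|⟨rfl, h'⟩|⟨rfl, h'⟩|⟨rfl, h'⟩|⟨rfl, h'⟩
            · exact absurd ⟨t, ht, h'⟩ h0
            · exact absurd ⟨t, ht, h'⟩ h1
            · exact absurd ⟨t, ht, h'⟩ h2
            · norm_num
            · norm_num
            · norm_num
            · norm_num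
            · norm_num
            · norm_num
          rw [pvMin_eq (did :: toks) 3 t0 ht0 hl hlb]
          rfl
        · rw [famLoop_neg did toks _ _ _ h3]
          by_cases h4 : ∃ t ∈ did :: toks, t ∈ pvGentooIds
          · rw [famLoop_pos did toks _ _ _ h4]
            obtain ⟨t0, ht0, hm⟩ := h4
            have hl : pvLookup t0 = some 4 := by
              unfold pvLookup
              rw [if_neg (fun hmem => h0 ⟨t0, ht0, hmem⟩), if_neg (fun hmem => h1 ⟨t0, ht0, hmem⟩), if_neg (fun hmem => h2 ⟨t0, ht0, hmem⟩), if_neg (fun hmem => h3 ⟨t0, ht0, hmem⟩), if_pos hm]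
            have hlb : ∀ t ∈ did :: toks, ∀ x, pvLookup t = some x → (4 : Int) ≤ x := by
              intro t ht x hx
              rcases pvLookup_cases t x hx with ⟨rfl, h'⟩|⟨rfl, h'⟩|⟨rfl, h'⟩|⟨rfl, h'⟩|⟨rfl, h'⟩|⟨rfl, h'⟩|⟨rfl, h'⟩|⟨rfl, h'⟩|⟨rfl, h'⟩
              · exact absurd ⟨t, ht, h'⟩ h0
              · exact absurd ⟨t, ht, h'⟩ h1
              · exact absurd ⟨t, ht, h'⟩ h2
              · exact absurd ⟨t, ht, h'⟩ h3
              · norm_num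
              · norm_num
              · norm_num
              · norm_num
              · norm_num
            rw [pvMin_eq (did :: toks) 4 t0 ht0 hl hlb]
            rfl
          · rw [famLoop_neg did toks _ _ _ h4]
            by_cases h5 : ∃ t ∈ did :: toks, t ∈ pvVoidIds
            · rw [famLoop_pos did toks _ _ _ h5]
              obtain ⟨t0, ht0, hm⟩ := h5
              have hl : pvLookup t0 = some 5 := by
                unfold pvLookup
                rw [if_neg (fun hmem => h0 ⟨t0, ht0, hmem⟩), if_neg (fun hmem => h1 ⟨t0, ht0, hmem⟩), if_neg (fun hmem => h2 ⟨t0, ht0, hmem⟩), if_neg (fun hmem => h3 ⟨t0, ht0, hmem⟩), if_neg (fun hmem => h4 ⟨t0, ht0, hmem⟩), if_pos hm]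
              have hlb : ∀ t ∈ did :: toks, ∀ x, pvLookup t = some x → (5 : Int) ≤ x := by
                intro t ht x hx
                rcases pvLookup_cases t x hx with ⟨rfl, h'⟩|⟨rfl, h'⟩|⟨rfl, h'⟩|⟨rfl, h'⟩|⟨rfl, h'⟩|⟨rfl, h'⟩|⟨rfl, h'⟩|⟨rfl, h'⟩|⟨rfl, h'⟩
                · exact absurd ⟨t, ht, h'⟩ h0
                · exact absurd ⟨t, ht, h'⟩ h1
                · exact absurd ⟨t, ht, h'⟩ h2
                · exact absurd ⟨t, ht, h'⟩ h3
                · exact absurd ⟨t, ht, h'⟩ h4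
                · norm_num
                · norm_num
                · norm_num
                · norm_num
              rw [pvMin_eq (did :: toks) 5 t0 ht0 hl hlb]
              rfl
            · rw [famLoop_neg did toks _ _ _ h5]
              by_cases h6 : ∃ t ∈ did :: toks, t ∈ pvAlpineIds
              · rw [famLoop_pos did toks _ _ _ h6]
                obtain ⟨t0, ht0, hm⟩ := h6
                have hl : pvLookup t0 = some 6 := by
                  unfold pvLookup
                  rw [if_neg (fun hmem => h0 ⟨t0, ht0, hmem⟩), if_neg (fun hmem => h1 ⟨t0, ht0, hmem⟩), if_neg (fun hmem => h2 ⟨t0, ht0, hmem⟩), if_neg (fun hmem => h3 ⟨t0, ht0, hmem⟩), if_neg (fun hmem => h4 ⟨t0, ht0, hmem⟩), if_neg (fun hmem => h5 ⟨t0, ht0, hmem⟩), if_pos hm]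
                have hlb : ∀ t ∈ did :: toks, ∀ x, pvLookup t = some x → (6 : Int) ≤ x := by
                  intro t ht x hx
                  rcases pvLookup_cases t x hx with ⟨rfl, h'⟩|⟨rfl, h'⟩|⟨rfl, h'⟩|⟨rfl, h'⟩|⟨rfl, h'⟩|⟨rfl, h'⟩|⟨rfl, h'⟩|⟨rfl, h'⟩|⟨rfl, h'⟩
                  · exact absurd ⟨t, ht, h'⟩ h0
                  · exact absurd ⟨t, ht, h'⟩ h1
                  · exact absurd ⟨t, ht, h'⟩ h2
                  · exact absurd ⟨t, ht, h'⟩ h3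
                  · exact absurd ⟨t, ht, h'⟩ h4
                  · exact absurd ⟨t, ht, h'⟩ h5
                  · norm_num
                  · norm_num
                  · norm_num
                rw [pvMin_eq (did :: toks) 6 t0 ht0 hl hlb]
                rfl
              · rw [famLoop_neg did toks _ _ _ h6]
                by_cases h7 : ∃ t ∈ did :: toks, t ∈ pvNixosIds
                · rw [famLoop_pos did toks _ _ _ h7]
                  obtain ⟨t0, ht0, hm⟩ := h7
                  have hl : pvLookup t0 = some 7 := by
                    unfold pvLookup
                    rw [if_neg (fun hmem => h0 ⟨t0, ht0, hmem⟩), if_neg (fun hmem => h1 ⟨t0, ht0, hmem⟩), if_neg (fun hmem => h2 ⟨t0, ht0, hmem⟩), if_neg (fun hmem => h3 ⟨t0, ht0, hmem⟩), if_neg (fun hmem => h4 ⟨t0, ht0, hmem⟩), if_neg (fun hmem => h5 ⟨t0, ht0, hmem⟩), if_neg (fun hmem => h6 ⟨t0, ht0, hmem⟩), if_pos hm]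
                  have hlb : ∀ t ∈ did :: toks, ∀ x, pvLookup t = some x → (7 : Int) ≤ x := by
                    intro t ht x hx
                    rcases pvLookup_cases t x hx with ⟨rfl, h'⟩|⟨rfl, h'⟩|⟨rfl, h'⟩|⟨rfl, h'⟩|⟨rfl, h'⟩|⟨rfl, h'⟩|⟨rfl, h'⟩|⟨rfl, h'⟩|⟨rfl, h'⟩
                    · exact absurd ⟨t, ht, h'⟩ h0
                    · exact absurd ⟨t, ht, h'⟩ h1
                    · exact absurd ⟨t, ht, h'⟩ h2
                    · exact absurd ⟨t, ht, h'⟩ h3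
                    · exact absurd ⟨t, ht, h'⟩ h4
                    · exact absurd ⟨t, ht, h'⟩ h5
                    · exact absurd ⟨t, ht, h'⟩ h6
                    · norm_num
                    · norm_num
                  rw [pvMin_eq (did :: toks) 7 t0 ht0 hl hlb]
                  rfl
                · rw [famLoop_neg did toks _ _ _ h7]
                  by_cases h8 : ∃ t ∈ did :: toks, t ∈ pvSolusIds
                  · rw [famLoop_pos did toks _ _ _ h8]
                    obtain ⟨t0, ht0, hm⟩ := h8
                    have hl : pvLookup t0 = some 8 := by
                      unfold pvLookup
                      rw [if_neg (fun hmem => h0 ⟨t0, ht0, hmem⟩), if_neg (fun hmem => h1 ⟨t0, ht0, hmem⟩), if_neg (fun hmem => h2 ⟨t0, ht0, hmem⟩), if_neg (fun hmem => h3 ⟨t0, ht0, hmem⟩), if_neg (fun hmem => h4 ⟨t0, ht0, hmem⟩), if_neg (fun hmem => h5 ⟨t0, ht0, hmem⟩), if_neg (fun hmem => h6 ⟨t0, ht0, hmem⟩), if_neg (fun hmem => h7 ⟨t0, ht0, hmem⟩), if_pos hm]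
                    have hlb : ∀ t ∈ did :: toks, ∀ x, pvLookup t = some x → (8 : Int) ≤ x := by
                      intro t ht x hx
                      rcases pvLookup_cases t x hx with ⟨rfl, h'⟩|⟨rfl, h'⟩|⟨rfl, h'⟩|⟨rfl, h'⟩|⟨rfl, h'⟩|⟨rfl, h'⟩|⟨rfl, h'⟩|⟨rfl, h'⟩|⟨rfl, h'⟩
                      · exact absurd ⟨t, ht, h'⟩ h0
                      · exact absurd ⟨t, ht, h'⟩ h1
                      · exact absurd ⟨t, ht, h'⟩ h2
                      · exact absurd ⟨t, ht, h'⟩ h3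
                      · exact absurd ⟨t, ht, h'⟩ h4
                      · exact absurd ⟨t, ht, h'⟩ h5
                      · exact absurd ⟨t, ht, h'⟩ h6
                      · exact absurd ⟨t, ht, h'⟩ h7
                      · norm_num
                    rw [pvMin_eq (did :: toks) 8 t0 ht0 hl hlb]
                    rfl
                  · rw [famLoop_neg did toks _ _ _ h8]
                    have hnil : (did :: toks).filterMap pvLookup = [] := by
                      apply List.filterMap_eq_nil_iff.2
                      intro t ht
                      cases hx : pvLookup t with
                      | none => rfl
                      | some x =>
                        exfalso
                        rcases pvLookup_cases t x hx with ⟨rfl, h'⟩|⟨rfl, h'⟩|⟨rfl, h'⟩|⟨rfl, h'⟩|⟨rfl, h'⟩|⟨rfl, h'⟩|⟨rfl, h'⟩|⟨rfl, h'⟩|⟨rfl, h'⟩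
                        · exact absurd ⟨t, ht, h'⟩ h0
                        · exact absurd ⟨t, ht, h'⟩ h1
                        · exact absurd ⟨t, ht, h'⟩ h2
                        · exact absurd ⟨t, ht, h'⟩ h3
                        · exact absurd ⟨t, ht, h'⟩ h4
                        · exact absurd ⟨t, ht, h'⟩ h5
                        · exact absurd ⟨t, ht, h'⟩ h6
                        · exact absurd ⟨t, ht, h'⟩ h7
                        · exact absurd ⟨t, ht, h'⟩ h8
                    rw [hnil]
                    rfl

-- ===== VERDICT (by name: the statement is the Claim_ definition above) =====
theorem family_py_spec : Claim_equal_family_py := by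
  intro distro_id like _
  unfold Spec_family_py family_py family_py_alt
  exact pvMain (PySem.Str.lower distro_id) (PySem.Str.split₀ (PySem.Str.lower like))
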